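-- pv_equiv track=rewrite | github.com/vladmir-bc/Courses | Stepik/3 Алгоритмы теория и практика. Методы/Блок 6/6.5.6 Задача (точки и отрезки с сортировкой на месте).py | binary_search_start
-- ===== SOURCE A (Python) =====
-- def binary_search_start(mas, k):
--     l = 0
--     r = len(mas) - 1
--     countr = 0
--     while l <= r:
--         m = (l + r) // 2
--         if mas[m] > k:
--             r = m - 1
--         else:
--             l = m + 1
--             countr = l
--     return countr
-- ===== SOURCE B (Python) =====
-- def binary_search_start(mas, k):
--     # recursion on the (offset, length) view of the search window:
--     # window = mas[lo : lo+n]; probe its middle element mas[lo + (n-1)//2]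
--     def go(lo, n):
--         if n == 0:
--             return lo
--         half = (n - 1) // 2
--         if mas[lo + half] > k:
--             return go(lo, half)
--         return go(lo + half + 1, n // 2)
--     return go(0, len(mas))
-- ===== Notes on version B (the rewrite author's own statement) =====
-- stated objective: alternative
-- what changed: The iterative while-loop over Int bounds l,r with a countr accumulator is replaced by a structural recursion on the (offset, length) view of the window over Nat, with no accumulator: the base case returns the offset directly.
import Mathlib
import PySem

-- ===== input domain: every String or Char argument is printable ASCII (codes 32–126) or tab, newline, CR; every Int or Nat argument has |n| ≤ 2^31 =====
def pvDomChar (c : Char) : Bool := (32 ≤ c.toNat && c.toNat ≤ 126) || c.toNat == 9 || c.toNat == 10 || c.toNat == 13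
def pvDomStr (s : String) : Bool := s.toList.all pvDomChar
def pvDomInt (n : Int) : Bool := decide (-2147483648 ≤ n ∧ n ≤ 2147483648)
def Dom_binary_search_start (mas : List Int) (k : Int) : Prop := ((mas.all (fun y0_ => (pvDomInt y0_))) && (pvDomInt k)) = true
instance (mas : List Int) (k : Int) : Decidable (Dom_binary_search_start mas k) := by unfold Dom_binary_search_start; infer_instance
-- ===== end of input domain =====

-- B replaces A's while-loop over Int bounds l,r with a countr accumulator by a structural
-- recursion on the (offset, length) view of the window over Nat; objective: alternative decomposition.

-- ===== PORT A =====
-- while l <= r: … ; returns countr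
def pvALoop (mas : List Int) (k l r countr : Int) : Int :=
  if h : l ≤ r then
    let m := PySem.Int.floordiv (l + r) 2
    if (PySem.List.pyGet? mas m).getD 0 > k then
      pvALoop mas k l (m - 1) countr
    else
      pvALoop mas k (m + 1) r (m + 1)
  else countr
termination_by (r + 1 - l).toNat
decreasing_by
  · have := PySem.Int.floordiv_two_mid_bounds h; omega
  · have := PySem.Int.floordiv_two_mid_bounds h; omega

def binary_search_start (mas : List Int) (k : Int) : Int :=
  pvALoop mas k 0 ((mas.length : Int) - 1) 0

-- ===== PORT B =====
-- go(lo, n): window mas[lo : lo+n]; the probed index lo + (n-1)//2 is always in range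
-- on the call from binary_search_start_alt, so 'mas[lo + half]' is ported as getD 0.
def pvGo (mas : List Int) (k : Int) (lo n : Nat) : Int :=
  if n = 0 then (lo : Int)
  else
    let half := (n - 1) / 2
    if (mas[lo + half]?.getD 0) > k then
      pvGo mas k lo half
    else
      pvGo mas k (lo + half + 1) (n / 2)
termination_by n
decreasing_by
  · omega
  · omega

def binary_search_start_alt (mas : List Int) (k : Int) : Int :=
  pvGo mas k 0 mas.length

-- ===== PRECONDITION & SPEC =====
def Spec_binary_search_start (mas : List Int) (k : Int) (out : Int) : Prop := out = binary_search_start_alt mas k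
instance (mas : List Int) (k : Int) (out : Int) : Decidable (Spec_binary_search_start mas k out) := by unfold Spec_binary_search_start; infer_instance

-- ===== CLAIM (what is proved, stated in full; the proofs are below) =====
def Claim_equal_binary_search_start : Prop := ∀ (mas : List Int) (k : Int), Dom_binary_search_start mas k → Spec_binary_search_start mas k (binary_search_start mas k)

-- ===== LEMMAS AND PROOFS =====
-- With l = lo, r = lo + n - 1 and the invariant countr = l, A's loop computes B's recursion:
-- the midpoint (l+r)//2 is lo + (n-1)/2, the left window has length (n-1)/2 and the right n/2.
theorem pvALoop_eq_pvGo (mas : List Int) (k : Int) :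
    ∀ (n lo : Nat), pvALoop mas k (lo : Int) ((lo : Int) + n - 1) (lo : Int) = pvGo mas k lo n := by
  intro n
  induction n using Nat.strong_induction_on with
  | _ n ih =>
    intro lo
    rw [pvALoop, pvGo]
    by_cases hn : n = 0
    · subst hn
      rw [dif_neg (by push_cast; omega)]
      push_cast; ring
    · have hle : (lo : Int) ≤ (lo : Int) + n - 1 := by omega
      simp only [dif_pos hle, if_neg hn]
      have hm : PySem.Int.floordiv ((lo : Int) + ((lo : Int) + n - 1)) 2
          = ((lo + (n - 1) / 2 : Nat) : Int) := by
        rw [PySem.Int.floordiv_eq_ediv_of_pos (by omega)]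
        omega
      rw [hm, PySem.List.pyGet?_natCast]
      by_cases hc : (mas[lo + (n - 1) / 2]?.getD 0) > k
      · simp only [if_pos hc]
        rw [show ((lo + (n - 1) / 2 : Nat) : Int) - 1
            = (lo : Int) + ((n - 1) / 2 : Nat) - 1 by push_cast; ring]
        exact ih ((n - 1) / 2) (by omega) lo
      · simp only [if_neg hc]
        rw [show ((lo + (n - 1) / 2 : Nat) : Int) + 1
            = ((lo + (n - 1) / 2 + 1 : Nat) : Int) by push_cast; ring,
           show (lo : Int) + n - 1
            = ((lo + (n - 1) / 2 + 1 : Nat) : Int) + ((n / 2 : Nat) : Int) - 1 by push_cast; omega]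
        exact ih (n / 2) (by omega) (lo + (n - 1) / 2 + 1)

-- ===== VERDICT (by name: the statement is the Claim_ definition above) =====
theorem binary_search_start_spec : Claim_equal_binary_search_start := by
  intro mas k _
  unfold Spec_binary_search_start binary_search_start binary_search_start_alt
  have := pvALoop_eq_pvGo mas k mas.length 0
  simpa using this
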